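-- pv_equiv track=rewrite | github.com/krystianbajno/azure-guidelines | sources/transform/cis_security_benchmark.py | estimate_severity
-- ===== SOURCE A (Python) =====
-- def estimate_severity(effects):
--     effects_lc = [e.lower().strip() for e in effects]
--     if any("deny" in e for e in effects_lc):
--         return "High"
--     elif any("audit" in e for e in effects_lc) or any("auditifnotexists" in e for e in effects_lc):
--         return "Medium"
--     else:
--         return "Low"
-- ===== SOURCE B (Python) =====
-- def estimate_severity(effects):
--     def score(effect):
--         e = effect.lower().strip()
--         if "deny" in e:
--             return 2
--         if "audit" in e:
--             return 1
--         return 0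
--     rank = max((score(e) for e in effects), default=0)
--     return ["Low", "Medium", "High"][rank]
-- ===== Notes on version B (the rewrite author's own statement) =====
-- stated objective: simpler
-- what changed: Replaced three priority-ordered whole-list any-scans over a precomputed lowercased list by a single per-element numeric scoring helper reduced with max (default 0 for the empty list) and a rank-to-label table lookup; the redundant 'auditifnotexists' scan disappears since it is subsumed by the 'audit' substring check.
import Mathlib
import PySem

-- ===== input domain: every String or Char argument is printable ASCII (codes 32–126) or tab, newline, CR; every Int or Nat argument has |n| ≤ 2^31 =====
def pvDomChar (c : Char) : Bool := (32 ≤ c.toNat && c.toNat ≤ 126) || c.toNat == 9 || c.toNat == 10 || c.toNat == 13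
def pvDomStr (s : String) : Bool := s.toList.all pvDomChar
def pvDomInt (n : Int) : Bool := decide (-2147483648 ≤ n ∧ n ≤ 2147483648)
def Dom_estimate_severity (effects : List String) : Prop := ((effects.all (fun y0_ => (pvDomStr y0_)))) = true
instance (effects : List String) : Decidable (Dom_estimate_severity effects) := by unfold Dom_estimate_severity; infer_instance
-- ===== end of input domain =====

-- B replaces three priority-ordered any-scans by per-element scoring reduced with max plus a rank table: simpler decomposition, same cost.


-- ===== PORT A =====
def estimate_severity (effects : List String) : String :=
  let effects_lc := effects.map (fun e => PySem.Str.strip (PySem.Str.lower e))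
  if effects_lc.any (fun e => PySem.Str.isIn "deny" e) then "High"
  else if effects_lc.any (fun e => PySem.Str.isIn "audit" e)
       || effects_lc.any (fun e => PySem.Str.isIn "auditifnotexists" e) then "Medium"
  else "Low"

-- ===== PORT B =====
def sevScore (effect : String) : Int :=
  let e := PySem.Str.strip (PySem.Str.lower effect)
  if PySem.Str.isIn "deny" e then 2
  else if PySem.Str.isIn "audit" e then 1
  else 0

def estimate_severity_alt (effects : List String) : String :=
  let rank := effects.foldl (fun acc e => max acc (sevScore e)) 0
  -- ["Low","Medium","High"][rank]; rank is always 0..2 so the default is never taken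
  PySem.List.pyGetD ["Low", "Medium", "High"] rank "Low"

-- ===== PRECONDITION & SPEC =====
def Spec_estimate_severity (effects : List String) (out : String) : Prop := out = estimate_severity_alt effects
instance (effects : List String) (out : String) : Decidable (Spec_estimate_severity effects out) := by unfold Spec_estimate_severity; infer_instance

-- ===== CLAIM (what is proved, stated in full; the proofs are below) =====
def Claim_equal_estimate_severity : Prop := ∀ (effects : List String), Dom_estimate_severity effects → Spec_estimate_severity effects (estimate_severity effects)

-- ===== LEMMAS AND PROOFS =====

-- element-level predicates after lower+strip
def pDeny (e : String) : Bool := PySem.Str.isIn "deny" (PySem.Str.strip (PySem.Str.lower e))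
def pAudit (e : String) : Bool := PySem.Str.isIn "audit" (PySem.Str.strip (PySem.Str.lower e))
def pAine (e : String) : Bool := PySem.Str.isIn "auditifnotexists" (PySem.Str.strip (PySem.Str.lower e))

-- the rank A's if-chain encodes, element-wise
def rankOf (l : List String) : Int :=
  if l.any pDeny then 2 else if l.any pAudit then 1 else 0

theorem rankOf_nonneg (l : List String) : 0 ≤ rankOf l := by
  unfold rankOf; split_ifs <;> norm_num

theorem rankOf_le_two (l : List String) : rankOf l ≤ 2 := by
  unfold rankOf; split_ifs <;> norm_num

theorem rankOf_cons (e : String) (t : List String) :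
    rankOf (e :: t) = max (sevScore e) (rankOf t) := by
  have h0 := rankOf_nonneg t
  have h2 := rankOf_le_two t
  have hs : sevScore e = if pDeny e then 2 else if pAudit e then 1 else 0 := rfl
  cases hde : pDeny e <;> cases hau : pAudit e <;>
    simp only [rankOf, List.any_cons, hde, hau, hs, Bool.false_or, Bool.true_or,
      if_true, if_false, Bool.false_eq_true] at * <;>
    split_ifs at * <;> omega

theorem foldl_max_eq_rankOf (l : List String) :
    ∀ a : Int, 0 ≤ a →
      l.foldl (fun acc e => max acc (sevScore e)) a = max a (rankOf l) := by
  induction l with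
  | nil => intro a ha; simp [rankOf]; omega
  | cons e t ih =>
      intro a ha
      simp only [List.foldl_cons]
      rw [ih (max a (sevScore e)) (le_trans ha (le_max_left _ _))]
      rw [rankOf_cons]
      omega

-- "auditifnotexists" in e implies "audit" in e
theorem aine_imp_audit (e : String) (h : pAine e = true) : pAudit e = true := by
  unfold pAine at h
  unfold pAudit
  rw [PySem.Str.isIn] at h ⊢
  rw [PySem.Chars.isIn_iff_infix] at h ⊢
  exact List.IsInfix.trans (by decide : ("audit".toList) <:+: ("auditifnotexists".toList)) h

-- ===== VERDICT (by name: the statement is the Claim_ definition above) =====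
theorem estimate_severity_spec : Claim_equal_estimate_severity := by
  intro effects _
  unfold Spec_estimate_severity estimate_severity estimate_severity_alt
  dsimp only
  rw [foldl_max_eq_rankOf effects 0 le_rfl]
  have hmax : max (0 : Int) (rankOf effects) = rankOf effects := by
    have := rankOf_nonneg effects; omega
  rw [hmax]
  simp only [List.any_map, Function.comp_def]
  rw [show (fun e => PySem.Str.isIn "deny" (PySem.Str.strip (PySem.Str.lower e))) = pDeny from rfl,
      show (fun e => PySem.Str.isIn "audit" (PySem.Str.strip (PySem.Str.lower e))) = pAudit from rfl,
      show (fun e => PySem.Str.isIn "auditifnotexists" (PySem.Str.strip (PySem.Str.lower e))) = pAine from rfl]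
  cases hD : effects.any pDeny with
  | true => simp only [rankOf, hD, if_true]; decide
  | false =>
      cases hAu : effects.any pAudit with
      | true =>
          simp only [rankOf, hD, hAu, Bool.true_or, Bool.false_eq_true, if_false, if_true]
          decide
      | false =>
          have hAi : effects.any pAine = false := by
            by_contra h
            rw [Bool.not_eq_false, List.any_eq_true] at h
            obtain ⟨x, hx, hxx⟩ := h
            have : effects.any pAudit = true :=
              List.any_eq_true.mpr ⟨x, hx, aine_imp_audit x hxx⟩
            simp [this] at hAu
          simp only [rankOf, hD, hAu, hAi, Bool.or_false, Bool.false_eq_true, if_false]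
          decide
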